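-- pv_equiv track=rewrite | github.com/YeMaungMaung/Grokking-Data-Structures-Algorithms | python/array/problem3.py | findDifferenceArray
-- ===== SOURCE A (Python) =====
-- def findDifferenceArray(nums):
--     n = len(nums)
--     differenceArray = [0] * n
--     leftSum = 0
--     rightSum = sum(nums)
--
--     for i in range(n):
--         rightSum -= nums[i]
--         differenceArray[i] = abs(rightSum - leftSum)
--         leftSum += nums[i]
--
--     return differenceArray
-- ===== SOURCE B (Python) =====
-- def findDifferenceArray(nums):
--     total = sum(nums)
--     prefix = [0]
--     for x in nums:
--         prefix.append(prefix[-1] + x)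
--     return [abs(total - 2 * p - x) for p, x in zip(prefix, nums)]
-- ===== Notes on version B (the rewrite author's own statement) =====
-- stated objective: alternative
-- what changed: B materializes a prefix-sum table in one pass and then computes each entry with the closed form abs(total - 2*prefixBefore[i] - nums[i]), instead of A's two scalar running sums updated inside the single output loop.
import Mathlib
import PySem

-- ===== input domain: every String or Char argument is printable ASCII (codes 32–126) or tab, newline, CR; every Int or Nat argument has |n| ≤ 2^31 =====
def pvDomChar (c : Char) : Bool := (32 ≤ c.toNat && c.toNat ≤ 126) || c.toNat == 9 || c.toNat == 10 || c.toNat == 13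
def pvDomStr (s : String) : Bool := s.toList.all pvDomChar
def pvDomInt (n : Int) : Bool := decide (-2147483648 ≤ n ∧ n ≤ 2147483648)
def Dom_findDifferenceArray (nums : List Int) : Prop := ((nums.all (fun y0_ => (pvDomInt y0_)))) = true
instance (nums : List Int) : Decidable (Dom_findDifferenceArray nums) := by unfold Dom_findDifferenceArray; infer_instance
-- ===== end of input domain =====

-- B replaces A's two running scalar sums with a materialized prefix-sum table and a
-- per-index closed form; same O(n) cost, different decomposition (objective: alternative).

-- ===== PORT A =====
-- A's loop over range(n): state (leftSum, rightSum), emitting one entry per element.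
def pvLoopA (nums : List Int) (leftSum rightSum : Int) : List Int :=
  match nums with
  | [] => []
  | x :: xs =>
    let rightSum' := rightSum - x
    |rightSum' - leftSum| :: pvLoopA xs (leftSum + x) rightSum'

def findDifferenceArray (nums : List Int) : List Int :=
  pvLoopA nums 0 nums.sum

-- ===== PORT B =====
-- Source B's prefix-building loop: appends acc + x each step (acc = prefix[-1]).
def pvPrefixTail (nums : List Int) (acc : Int) : List Int :=
  match nums with
  | [] => []
  | x :: xs => (acc + x) :: pvPrefixTail xs (acc + x)

def findDifferenceArray_alt (nums : List Int) : List Int :=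
  let total := nums.sum
  let pref := 0 :: pvPrefixTail nums 0
  (pref.zip nums).map (fun px => |total - 2 * px.1 - px.2|)

-- ===== PRECONDITION & SPEC =====
def Spec_findDifferenceArray (nums : List Int) (out : List Int) : Prop := out = findDifferenceArray_alt nums
instance (nums : List Int) (out : List Int) : Decidable (Spec_findDifferenceArray nums out) := by unfold Spec_findDifferenceArray; infer_instance

-- ===== CLAIM (what is proved, stated in full; the proofs are below) =====
def Claim_equal_findDifferenceArray : Prop := ∀ (nums : List Int), Dom_findDifferenceArray nums → Spec_findDifferenceArray nums (findDifferenceArray nums)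

-- ===== LEMMAS AND PROOFS =====
-- Invariant: with r the sum of the remaining elements shifted so that l + r is the
-- original total, A's loop equals B's zip-map with prefixes resumed at l.
lemma pvLoopA_eq (xs : List Int) : ∀ (l r : Int),
    pvLoopA xs l r =
      (((l :: pvPrefixTail xs l).zip xs).map (fun px => |(l + r) - 2 * px.1 - px.2|)) := by
  induction xs with
  | nil => intro l r; rfl
  | cons x xs ih =>
    intro l r
    simp only [pvLoopA, pvPrefixTail, List.zip_cons_cons, List.map_cons, ih (l + x) (r - x)]
    congr 1
    · congr 1; ring
    · apply List.map_congr_left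
      intro p _
      congr 2; ring

-- ===== VERDICT (by name: the statement is the Claim_ definition above) =====
theorem findDifferenceArray_spec : Claim_equal_findDifferenceArray := by
  intro nums _
  unfold Spec_findDifferenceArray findDifferenceArray findDifferenceArray_alt
  simpa using pvLoopA_eq nums 0 nums.sum
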